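-- pv_equiv track=rewrite | github.com/nileshdattatraykedare/assignments | test_5.py | aligncharacters
-- ===== SOURCE A (Python) =====
-- from math import sqrt
--
-- max_val = 257
--
-- def aligncharacters(s):
--     prime = [True] * (max_val + 1)
--
--     # 0 and 1 are not primes
--     prime[0] = False
--     prime[1] = False
--     for p in range(2, int(sqrt(max_val)) + 1):
--
--         # If prime[p] is not changed, then
--         # it is a prime
--
--         if prime[p]:
--
--             # Update all multiples of p
--             for i in range(2 * p, max_val + 1, p):
--                 prime[i] = False
--
--     part1 = []
--     part2 = []
--     # Traverse all the characters
--     for i in range(len(s)):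
--         if prime[ord(s[i])]:
--             part1 += [ord(s[i])]
--         else:
--             part2 += [ord(s[i])]
--
--     part1.sort()
--     part2.sort(reverse=True)
--     mergedlist = []
--     mergedlist.extend(part1)
--     mergedlist.extend(part2)
--     output = ""
--
--     for i in mergedlist:
--         output += chr(i)
--     return output
-- ===== SOURCE B (Python) =====
-- def aligncharacters(s):
--     def _is_prime(n):
--         return n >= 2 and all(n % d for d in range(2, n))
--
--     counts = [0] * 258
--     for c in s:
--         counts[ord(c)] += 1
--     asc = []
--     desc = []
--     for v in range(258):
--         if counts[v]:
--             block = chr(v) * counts[v]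
--             if _is_prime(v):
--                 asc.append(block)
--             else:
--                 desc.append(block)
--     return "".join(asc) + "".join(reversed(desc))
-- ===== Notes on version B (the rewrite author's own statement) =====
-- stated objective: faster
-- what changed: Replaces A's Eratosthenes sieve plus two comparison sorts of the code lists by a trial-division primality test and a counting sort over the bounded codepoint alphabet (one counts array, then one ascending and one descending sweep over the 258 possible codes).
import Mathlib
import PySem

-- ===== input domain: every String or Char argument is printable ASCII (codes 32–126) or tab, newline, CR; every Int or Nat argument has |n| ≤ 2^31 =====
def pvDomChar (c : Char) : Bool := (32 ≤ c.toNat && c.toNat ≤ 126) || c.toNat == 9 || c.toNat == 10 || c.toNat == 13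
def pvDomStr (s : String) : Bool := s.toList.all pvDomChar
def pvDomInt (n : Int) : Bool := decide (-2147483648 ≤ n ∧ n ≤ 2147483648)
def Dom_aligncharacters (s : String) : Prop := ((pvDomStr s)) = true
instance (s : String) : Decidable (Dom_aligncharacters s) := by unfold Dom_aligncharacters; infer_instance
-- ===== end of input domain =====

-- B replaces A's sieve + two comparison sorts by trial-division primality and a counting sort
-- over the bounded codepoint alphabet (objective: faster, O(n) vs O(n log n) in the string length).

-- ===== PORT A =====
-- the sieve of Eratosthenes over [0, 257], exactly as A builds it (independent of s)
def pvSievePrime : List Bool :=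
  (PySem.List.pyRange 2 17 1).foldl
    (fun pr p =>
      if pr.getD p.toNat false then
        (PySem.List.pyRange (2 * p) 258 p).foldl (fun pr2 i => pr2.set i.toNat false) pr
      else pr)
    (((List.replicate 258 true).set 0 false).set 1 false)

-- prime[ord(s[i])] is exact here: on Dom_ every code is ≤ 126 < 258 = len(prime)
def aligncharacters (s : String) : String :=
  let prime := pvSievePrime
  let parts := s.toList.foldl
    (fun (pr : List Nat × List Nat) c =>
      if prime.getD c.toNat false then (pr.1 ++ [c.toNat], pr.2) else (pr.1, pr.2 ++ [c.toNat]))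
    ([], [])
  let part1 := PySem.List.sorted parts.1 (fun x => x) false
  let part2 := PySem.List.sorted parts.2 (fun x => x) true
  String.mk ((part1 ++ part2).map Char.ofNat)

-- ===== PORT B =====
-- _is_prime(n) = n >= 2 and all(n % d for d in range(2, n))
def pvIsPrime (v : Nat) : Bool :=
  decide (2 ≤ v) && (PySem.List.pyRange 2 (v : Int) 1).all (fun d => !(PySem.Int.mod (v : Int) d == 0))

def aligncharacters_alt (s : String) : String :=
  let counts := s.toList.foldl
    (fun (cn : List Nat) c => cn.set c.toNat (cn.getD c.toNat 0 + 1)) (List.replicate 258 0)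
  let pr := (List.range 258).foldl
    (fun (pr : List (List Char) × List (List Char)) v =>
      if counts.getD v 0 ≠ 0 then
        if pvIsPrime v then (pr.1 ++ [List.replicate (counts.getD v 0) (Char.ofNat v)], pr.2)
        else (pr.1, pr.2 ++ [List.replicate (counts.getD v 0) (Char.ofNat v)])
      else pr)
    ([], [])
  String.mk (pr.1.flatten ++ pr.2.reverse.flatten)

-- ===== PRECONDITION & SPEC =====
def Spec_aligncharacters (s : String) (out : String) : Prop := out = aligncharacters_alt s
instance (s : String) (out : String) : Decidable (Spec_aligncharacters s out) := by unfold Spec_aligncharacters; infer_instance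

-- ===== CLAIM (what is proved, stated in full; the proofs are below) =====
def Claim_equal_aligncharacters : Prop := ∀ (s : String), Dom_aligncharacters s → Spec_aligncharacters s (aligncharacters s)

-- ===== LEMMAS AND PROOFS =====

-- the sieve table and B's trial division agree on the whole alphabet
set_option maxRecDepth 100000 in
lemma pvSieve_eq_isPrime : ∀ v < 258, pvSievePrime.getD v false = pvIsPrime v := by decide

-- A's partition loop
lemma pvFoldA (p : Nat → Bool) (cs : List Char) (acc : List Nat × List Nat) :
    cs.foldl (fun pr c => if p c.toNat then (pr.1 ++ [c.toNat], pr.2) else (pr.1, pr.2 ++ [c.toNat])) acc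
      = (acc.1 ++ (cs.map Char.toNat).filter p,
         acc.2 ++ (cs.map Char.toNat).filter (fun v => !p v)) := by
  induction cs generalizing acc with
  | nil => simp
  | cons c cs ih =>
    simp only [List.foldl_cons, List.map_cons, List.filter_cons]
    by_cases h : p c.toNat = true
    · simp [h, ih]
    · simp [h, ih]

-- B's counting loop
lemma pvFoldCounts (cs : List Char) (cn : List Nat) (hlt : ∀ c ∈ cs, c.toNat < cn.length) (v : Nat) :
    (cs.foldl (fun cn c => cn.set c.toNat (cn.getD c.toNat 0 + 1)) cn).getD v 0
      = cn.getD v 0 + (cs.map Char.toNat).count v := by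
  induction cs generalizing cn with
  | nil => simp
  | cons c cs ih =>
    simp only [List.foldl_cons, List.map_cons, List.count_cons]
    rw [ih _ (fun d hd => by simpa using hlt d (List.mem_cons_of_mem _ hd))]
    have hc : c.toNat < cn.length := hlt c (List.mem_cons_self ..)
    simp only [List.getD, List.getElem?_set, hc, if_true]
    by_cases h : c.toNat = v
    · simp [h]; omega
    · simp [h]

-- B's emission loop
lemma pvFoldB (g : Nat → List Char) (cnt : Nat → Nat) (q : Nat → Bool) (l : List Nat)
    (acc : List (List Char) × List (List Char)) :
    l.foldl (fun pr v =>
        if cnt v ≠ 0 then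
          if q v then (pr.1 ++ [g v], pr.2) else (pr.1, pr.2 ++ [g v])
        else pr) acc
      = (acc.1 ++ (l.filter (fun v => !decide (cnt v = 0) && q v)).map g,
         acc.2 ++ (l.filter (fun v => !decide (cnt v = 0) && !q v)).map g) := by
  induction l generalizing acc with
  | nil => simp
  | cons v l ih =>
    simp only [List.foldl_cons, List.filter_cons]
    by_cases h0 : cnt v = 0
    · rw [if_neg (by simp [h0]), ih]
      simp [h0]
    · by_cases hq : q v = true
      · rw [if_pos h0, if_pos hq, ih]
        simp [h0, hq]
      · rw [if_pos h0, if_neg hq, ih]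
        simp [h0, hq]

-- replicate blocks of zero count vanish under flatMap
lemma pvFlatMap_drop_zero (cnt : Nat → Nat) (q : Nat → Bool) (g : Nat → List Char)
    (hg : ∀ v, (g v).length = cnt v) (l : List Nat) :
    (l.filter (fun v => !decide (cnt v = 0) && q v)).flatMap g = (l.filter q).flatMap g := by
  induction l with
  | nil => rfl
  | cons v l ih =>
    simp only [List.filter_cons]
    by_cases h0 : cnt v = 0
    · have hnil : g v = [] := List.eq_nil_of_length_eq_zero (by rw [hg v, h0])
      by_cases hq : q v = true <;> simp [h0, hq, ih, hnil]
    · by_cases hq : q v = true <;> simp [h0, hq, ih]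

-- counting a flatMap of replicate-blocks over a Nodup index list
lemma pvCount_flatMap (k : Nat → Nat) (l : List Nat) (hnd : l.Nodup) (w : Nat) :
    (l.flatMap (fun v => List.replicate (k v) v)).count w = if w ∈ l then k w else 0 := by
  induction l with
  | nil => simp
  | cons v l ih =>
    rcases List.nodup_cons.mp hnd with ⟨hv, hnd'⟩
    simp only [List.flatMap_cons, List.count_append, ih hnd', List.count_replicate, List.mem_cons]
    by_cases h : v = w
    · subst h; simp [hv]
    · have h' : ¬ w = v := fun hh => h hh.symm
      simp [h, h']

-- a flatMap of replicate-blocks over an increasing index list is sorted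
lemma pvPairwise_flatMap (k : Nat → Nat) (l : List Nat) (hpw : l.Pairwise (· < ·)) :
    (l.flatMap (fun v => List.replicate (k v) v)).Pairwise (· ≤ ·) := by
  induction l with
  | nil => simp
  | cons v l ih =>
    rcases List.pairwise_cons.mp hpw with ⟨hv, hpw'⟩
    simp only [List.flatMap_cons]
    apply List.pairwise_append.mpr
    refine ⟨List.pairwise_replicate.mpr (Or.inr le_rfl), ih hpw', ?_⟩
    intro a ha b hb
    have ha' := List.eq_of_mem_replicate ha
    rcases List.mem_flatMap.mp hb with ⟨u, hu, hbu⟩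
    have hb' := List.eq_of_mem_replicate hbu
    subst ha'; subst hb'
    exact le_of_lt (hv _ hu)

-- the canonical sorted form: any ≤-sorted rearrangement of (xs.filter p) IS the counting-sort output
lemma pvCanon (p : Nat → Bool) (xs : List Nat) (hx : ∀ x ∈ xs, x < 258) (ys : List Nat)
    (hperm : ys.Perm (xs.filter p)) (hpw : ys.Pairwise (· ≤ ·)) :
    ys = ((List.range 258).filter p).flatMap (fun v => List.replicate (xs.count v) v) := by
  apply PySem.List.eq_of_perm_of_pairwise_le_of_injective (fun x : Nat => x) (fun _ _ h => h)
  · refine hperm.trans (List.perm_iff_count.mpr fun w => ?_)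
    rw [pvCount_flatMap _ _ ((List.nodup_range).filter _) w]
    simp only [List.mem_filter, List.mem_range]
    by_cases hpw' : p w = true
    · rw [List.count_filter hpw']
      by_cases hw : w < 258
      · simp [hw, hpw']
      · have : xs.count w = 0 := List.count_eq_zero.mpr (fun hmem => hw (hx w hmem))
        simp [hw, this]
    · have : w ∉ xs.filter p := fun hmem => hpw' (List.of_mem_filter hmem)
      simp [List.count_eq_zero.mpr this, hpw']
  · exact hpw
  · exact pvPairwise_flatMap _ _ ((List.pairwise_lt_range).filter _)

-- the A-side descending half, reversed, is also a ≤-sorted rearrangement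
lemma pvCanon_rev (p : Nat → Bool) (xs : List Nat) (hx : ∀ x ∈ xs, x < 258) :
    PySem.List.sorted (xs.filter p) (fun x => x) true
      = (((List.range 258).filter p).flatMap (fun v => List.replicate (xs.count v) v)).reverse := by
  have h := pvCanon p xs hx (PySem.List.sorted (xs.filter p) (fun x => x) true).reverse
    ((List.reverse_perm _).trans (PySem.List.sorted_perm _ _ _))
    (List.pairwise_reverse.mpr (PySem.List.sorted_pairwise_rev (xs.filter p) (fun x => x)))
  rw [← h, List.reverse_reverse]

-- ===== VERDICT (by name: the statement is the Claim_ definition above) =====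
set_option maxRecDepth 100000 in
theorem aligncharacters_spec : Claim_equal_aligncharacters := by
  intro s hdom
  show aligncharacters s = aligncharacters_alt s
  have hlt : ∀ c ∈ s.toList, c.toNat < 258 := by
    intro c hc
    have := List.all_eq_true.mp hdom c hc
    simp [pvDomChar] at this
    omega
  simp only [aligncharacters, aligncharacters_alt]
  generalize s.toList = cs at hlt ⊢
  -- the count array computes List.count on the codes
  have hcnt : ∀ v, (cs.foldl (fun cn c => cn.set c.toNat (cn.getD c.toNat 0 + 1))
      (List.replicate 258 0)).getD v 0 = (cs.map Char.toNat).count v := by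
    intro v
    rw [pvFoldCounts cs _ (by simpa using hlt) v]
    rcases Nat.lt_or_ge v 258 with h | h
    · rw [List.getD_eq_getElem?_getD, List.getElem?_replicate, if_pos h]
      simp
    · rw [List.getD_eq_getElem?_getD, List.getElem?_replicate, if_neg (by omega)]
      simp
  set codes := cs.map Char.toNat with hcodes
  set cnts := cs.foldl (fun cn c => cn.set c.toNat (cn.getD c.toNat 0 + 1))
      (List.replicate 258 0) with hcnts
  rw [pvFoldA (fun v => pvSievePrime.getD v false) cs ([], [])]
  rw [pvFoldB (fun v => List.replicate (cnts.getD v 0) (Char.ofNat v))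
      (fun v => cnts.getD v 0) pvIsPrime (List.range 258) ([], [])]
  simp only [hcnt, List.nil_append]
  have hx : ∀ x ∈ codes, x < 258 := by
    intro x hxm
    rcases List.mem_map.mp hxm with ⟨c, hc, rfl⟩
    exact hlt c hc
  have hfc : ∀ q : Bool → Bool,
      (List.range 258).filter (fun v => q (pvSievePrime.getD v false))
        = (List.range 258).filter (fun v => q (pvIsPrime v)) := by
    intro q
    exact List.filter_congr (fun v hv => by
      rw [pvSieve_eq_isPrime v (List.mem_range.mp hv)])
  -- ascending halves
  have e1 : (PySem.List.sorted (codes.filter (fun v => pvSievePrime.getD v false))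
        (fun x => x) false).map Char.ofNat
      = (((List.range 258).filter (fun v =>
          !decide (codes.count v = 0) && pvIsPrime v)).map
            (fun v => List.replicate (codes.count v) (Char.ofNat v))).flatten := by
    rw [← List.flatMap_def,
        pvFlatMap_drop_zero (fun v => codes.count v) pvIsPrime _ (fun v => List.length_replicate),
        pvCanon (fun v => pvSievePrime.getD v false) codes hx _
          (PySem.List.sorted_perm _ _ _) (PySem.List.sorted_pairwise _ _)]
    rw [show ((List.range 258).filter pvIsPrime)
          = (List.range 258).filter (fun v => pvSievePrime.getD v false) from
        (hfc (fun b => b)).symm]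
    simp [List.map_flatMap, List.map_replicate]
  -- descending halves
  have e2 : (PySem.List.sorted (codes.filter (fun v => !pvSievePrime.getD v false))
        (fun x => x) true).map Char.ofNat
      = (((List.range 258).filter (fun v =>
          !decide (codes.count v = 0) && !pvIsPrime v)).map
            (fun v => List.replicate (codes.count v) (Char.ofNat v))).reverse.flatten := by
    rw [← List.map_reverse, ← List.flatMap_def, ← List.filter_reverse,
        pvFlatMap_drop_zero (fun v => codes.count v) (fun v => !pvIsPrime v) _
          (fun v => List.length_replicate),
        List.filter_reverse,
        show ((List.range 258).filter (fun v => !pvIsPrime v))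
          = (List.range 258).filter (fun v => !pvSievePrime.getD v false) from
            (hfc (fun b => !b)).symm,
        pvCanon_rev (fun v => !pvSievePrime.getD v false) codes hx]
    rw [List.reverse_flatMap]
    simp only [List.flatMap_def, List.map_flatten, List.map_map]
    refine congrArg _ (List.map_congr_left fun v _ => ?_)
    simp [List.reverse_replicate, List.map_replicate]
  rw [List.map_append, e1, e2]
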